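-- pv_equiv track=rewrite | github.com/xtevenx/dump | symmetric_nonbipartite.py | invariant_labels
-- ===== SOURCE A (Python) =====
-- def invariant_labels(graph, n):
--     labels = [1] * n
--     for _ in range(2):
--         incoming = [0] * n
--         outgoing = [0] * n
--         for i, j in graph:
--             incoming[j] += labels[i]
--             outgoing[i] += labels[j]
--         for i in range(n):
--             labels[i] = hash((incoming[i], outgoing[i]))
--     return labels
-- ===== SOURCE B (Python) =====
-- def invariant_labels(graph, n):
--     # Node-indexed adjacency tables built once; then two node-centric rounds.
--     preds = [[] for _ in range(n)]
--     succs = [[] for _ in range(n)]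
--     for i, j in graph:
--         preds[j].append(i)
--         succs[i].append(j)
--     labels = [1] * n
--     for _ in range(2):
--         labels = [hash((sum(labels[p] for p in preds[k]),
--                         sum(labels[s] for s in succs[k])))
--                   for k in range(n)]
--     return labels
-- ===== Notes on version B (the rewrite author's own statement) =====
-- stated objective: alternative
-- what changed: A rebuilds incoming/outgoing each round by scattering over the edge list in place; B builds predecessor/successor adjacency tables once and computes each round node-centrically as per-node sums over the prebuilt buckets.
-- outside the precondition, e.g. on invariant_labels([(0, 2)], 2): A raises IndexError, B raises IndexError
import Mathlib
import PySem

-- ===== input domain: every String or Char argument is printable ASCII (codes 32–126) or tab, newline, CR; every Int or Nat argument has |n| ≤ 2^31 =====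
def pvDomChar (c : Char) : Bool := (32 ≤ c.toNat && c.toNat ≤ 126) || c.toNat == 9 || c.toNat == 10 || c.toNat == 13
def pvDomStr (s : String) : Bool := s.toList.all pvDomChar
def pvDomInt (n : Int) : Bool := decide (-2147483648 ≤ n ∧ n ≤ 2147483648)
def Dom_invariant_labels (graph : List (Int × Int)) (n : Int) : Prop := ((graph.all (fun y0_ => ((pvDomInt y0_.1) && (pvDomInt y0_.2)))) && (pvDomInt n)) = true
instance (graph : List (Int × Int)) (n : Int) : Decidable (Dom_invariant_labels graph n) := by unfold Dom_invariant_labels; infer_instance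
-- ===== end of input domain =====

-- B replaces A's per-round edge scatter with adjacency tables built once and node-centric sums (alternative decomposition, same cost).
-- CPython's hash for a pair of ints (sign-magnitude modulo 2^61-1 per element, then the xxHash-style tuple combiner on 64-bit words)
-- is ported by hand below; it is exact for tuples of two ints and does not depend on PYTHONHASHSEED.

-- hash helpers, shared by both ports (both Pythons call the builtin hash on a 2-tuple of ints)
def pvIntHash (x : Int) : Int :=
  let h := if 0 ≤ x then x % 2305843009213693951 else -((-x) % 2305843009213693951)
  if h = -1 then -2 else h

def pvU64ofInt (x : Int) : UInt64 := UInt64.ofNat (x % 18446744073709551616).toNat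

def pvStep (acc : UInt64) (x : Int) : UInt64 :=
  let a := acc + pvU64ofInt (pvIntHash x) * 14029467366897019727
  ((a <<< 31) ||| (a >>> 33)) * 11400714785074694791

def pvHash2 (x y : Int) : Int :=
  let acc := pvStep (pvStep 2870177450012600261 x) y + ((2 : UInt64) ^^^ 2870177450012600261 ^^^ 3527539)
  if acc = 18446744073709551615 then 1546275796
  else if acc.toNat < 9223372036854775808 then (acc.toNat : Int) else (acc.toNat : Int) - 18446744073709551616

-- ===== PORT A =====
-- one round of A: scatter over the edge list into incoming/outgoing, then relabel each node
def pvRoundA (graph : List (Int × Int)) (n : Int) (labels : List Int) : List Int :=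
  let st := graph.foldl
    (fun (st : List Int × List Int) e =>
      (PySem.List.pySetD st.1 e.2 (PySem.List.pyGetD st.1 e.2 0 + PySem.List.pyGetD labels e.1 0),
       PySem.List.pySetD st.2 e.1 (PySem.List.pyGetD st.2 e.1 0 + PySem.List.pyGetD labels e.2 0)))
    (List.replicate n.toNat 0, List.replicate n.toNat 0)
  (PySem.List.pyRange 0 n 1).map
    (fun i => pvHash2 (PySem.List.pyGetD st.1 i 0) (PySem.List.pyGetD st.2 i 0))

def invariant_labels (graph : List (Int × Int)) (n : Int) : List Int :=
  pvRoundA graph n (pvRoundA graph n (List.replicate n.toNat 1))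

-- ===== PORT B =====
-- adjacency tables (preds, succs), built once from the edge list
def pvBuckets (graph : List (Int × Int)) (n : Int) : List (List Int) × List (List Int) :=
  graph.foldl
    (fun (pr : List (List Int) × List (List Int)) e =>
      (PySem.List.pySetD pr.1 e.2 (PySem.List.pyGetD pr.1 e.2 [] ++ [e.1]),
       PySem.List.pySetD pr.2 e.1 (PySem.List.pyGetD pr.2 e.1 [] ++ [e.2])))
    (List.replicate n.toNat [], List.replicate n.toNat [])

-- one round of B: per node, sum the labels over its bucket, then hash
def pvRoundB (pr : List (List Int) × List (List Int)) (n : Int) (labels : List Int) : List Int :=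
  (PySem.List.pyRange 0 n 1).map
    (fun k => pvHash2
      ((PySem.List.pyGetD pr.1 k []).foldl (fun a p => a + PySem.List.pyGetD labels p 0) 0)
      ((PySem.List.pyGetD pr.2 k []).foldl (fun a s => a + PySem.List.pyGetD labels s 0) 0))

def invariant_labels_alt (graph : List (Int × Int)) (n : Int) : List Int :=
  let pr := pvBuckets graph n
  pvRoundB pr n (pvRoundB pr n (List.replicate n.toNat 1))

-- ===== PRECONDITION & SPEC =====
-- A raises IndexError when some edge endpoint is outside Python's index range [-n, n); Pre_ excludes exactly those inputs.
def Pre_invariant_labels (graph : List (Int × Int)) (n : Int) : Prop :=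
  ∀ e ∈ graph, (-n ≤ e.1 ∧ e.1 < n) ∧ (-n ≤ e.2 ∧ e.2 < n)

instance (graph : List (Int × Int)) (n : Int) : Decidable (Pre_invariant_labels graph n) := by
  unfold Pre_invariant_labels; infer_instance

def pvWitness_invariant_labels : (List (Int × Int)) × Int := ([(0, 1), (1, 0), (-1, 1)], 2)

def Spec_invariant_labels (graph : List (Int × Int)) (n : Int) (out : List Int) : Prop := out = invariant_labels_alt graph n
instance (graph : List (Int × Int)) (n : Int) (out : List Int) : Decidable (Spec_invariant_labels graph n out) := by unfold Spec_invariant_labels; infer_instance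

-- ===== CLAIM (what is proved, stated in full; the proofs are below) =====
def Claim_equal_invariant_labels : Prop := ∀ (graph : List (Int × Int)) (n : Int), Dom_invariant_labels graph n → Pre_invariant_labels graph n → Spec_invariant_labels graph n (invariant_labels graph n)

-- ===== LEMMAS AND PROOFS =====

-- normalised (wrapped) Python index, as pyIdx? computes it
def pvNorm (m : Nat) (i : Int) : Nat := if 0 ≤ i then i.toNat else m - (-i).toNat

theorem pvIdx_eq (m : Nat) (i : Int) (h1 : -(m : Int) ≤ i) (h2 : i < m) :
    PySem.List.pyIdx? m i = some (pvNorm m i) := by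
  unfold PySem.List.pyIdx? pvNorm
  split_ifs <;> rfl

theorem pvGetD_norm {α : Type} (xs : List α) (i : Int) (d : α)
    (h1 : -(xs.length : Int) ≤ i) (h2 : i < xs.length) :
    PySem.List.pyGetD xs i d = xs.getD (pvNorm xs.length i) d := by
  simp [PySem.List.pyGetD, PySem.List.pyGet?, pvIdx_eq _ _ h1 h2, List.getD_eq_getElem?_getD]

theorem pvSetD_norm {α : Type} (xs : List α) (i : Int) (v : α)
    (h1 : -(xs.length : Int) ≤ i) (h2 : i < xs.length) :
    PySem.List.pySetD xs i v = xs.set (pvNorm xs.length i) v := by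
  simp [PySem.List.pySetD, PySem.List.pySet?, pvIdx_eq _ _ h1 h2]

-- A's pair fold splits into two independent folds (incoming / outgoing)
theorem pvSplitA (L : List Int) : ∀ (g : List (Int × Int)) (a b : List Int),
    g.foldl (fun (st : List Int × List Int) e =>
        (PySem.List.pySetD st.1 e.2 (PySem.List.pyGetD st.1 e.2 0 + PySem.List.pyGetD L e.1 0),
         PySem.List.pySetD st.2 e.1 (PySem.List.pyGetD st.2 e.1 0 + PySem.List.pyGetD L e.2 0))) (a, b)
      = (g.foldl (fun s e => PySem.List.pySetD s e.2 (PySem.List.pyGetD s e.2 0 + PySem.List.pyGetD L e.1 0)) a,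
         g.foldl (fun s e => PySem.List.pySetD s e.1 (PySem.List.pyGetD s e.1 0 + PySem.List.pyGetD L e.2 0)) b) := by
  intro g
  induction g with
  | nil => intro a b; rfl
  | cons e t ih => intro a b; simpa using ih _ _

-- B's pair fold splits into two independent folds (preds / succs)
theorem pvSplitB : ∀ (g : List (Int × Int)) (a b : List (List Int)),
    g.foldl (fun (pr : List (List Int) × List (List Int)) e =>
        (PySem.List.pySetD pr.1 e.2 (PySem.List.pyGetD pr.1 e.2 [] ++ [e.1]),
         PySem.List.pySetD pr.2 e.1 (PySem.List.pyGetD pr.2 e.1 [] ++ [e.2]))) (a, b)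
      = (g.foldl (fun s e => PySem.List.pySetD s e.2 (PySem.List.pyGetD s e.2 [] ++ [e.1])) a,
         g.foldl (fun s e => PySem.List.pySetD s e.1 (PySem.List.pyGetD s e.1 [] ++ [e.2])) b) := by
  intro g
  induction g with
  | nil => intro a b; rfl
  | cons e t ih => intro a b; simpa using ih _ _

-- scatter characterisation: A's in-place "+=" fold, read pointwise
theorem pvScatter (tgt : Int × Int → Int) (val : Int × Int → Int) :
    ∀ (g : List (Int × Int)) (acc : List Int) (m : Nat), acc.length = m →
      (∀ e ∈ g, -(m : Int) ≤ tgt e ∧ tgt e < m) → ∀ k, k < m →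
      (g.foldl (fun a e => PySem.List.pySetD a (tgt e) (PySem.List.pyGetD a (tgt e) 0 + val e)) acc).getD k 0
        = acc.getD k 0 + ((g.filter (fun e => pvNorm m (tgt e) == k)).map val).sum := by
  intro g
  induction g with
  | nil => intro acc m hm hg k hk; simp
  | cons e t ih =>
    intro acc m hm hg k hk
    have he := hg e (List.mem_cons_self)
    have h1 : -(acc.length : Int) ≤ tgt e := by omega
    have h2 : tgt e < acc.length := by omega
    have hset : PySem.List.pySetD acc (tgt e) (PySem.List.pyGetD acc (tgt e) 0 + val e)
        = acc.set (pvNorm m (tgt e)) (acc.getD (pvNorm m (tgt e)) 0 + val e) := by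
      rw [pvSetD_norm _ _ _ h1 h2, pvGetD_norm _ _ _ h1 h2, hm]
    have hlen : (acc.set (pvNorm m (tgt e)) (acc.getD (pvNorm m (tgt e)) 0 + val e)).length = m := by
      simp [hm]
    simp only [List.foldl_cons, hset,
      ih _ m hlen (fun e' he' => hg e' (List.mem_cons_of_mem _ he')) k hk]
    by_cases hek : pvNorm m (tgt e) = k
    · have hkl : k < acc.length := by omega
      simp [hek, List.getD_eq_getElem?_getD, hkl]
      ring
    · have : (acc.set (pvNorm m (tgt e)) (acc.getD (pvNorm m (tgt e)) 0 + val e)).getD k 0 = acc.getD k 0 := by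
        simp [List.getD_eq_getElem?_getD, hek]
      simp [hek]

-- gather characterisation: B's bucket-building fold, read pointwise
theorem pvGather (tgt : Int × Int → Int) (keep : Int × Int → Int) :
    ∀ (g : List (Int × Int)) (acc : List (List Int)) (m : Nat), acc.length = m →
      (∀ e ∈ g, -(m : Int) ≤ tgt e ∧ tgt e < m) → ∀ k, k < m →
      (g.foldl (fun a e => PySem.List.pySetD a (tgt e) (PySem.List.pyGetD a (tgt e) [] ++ [keep e])) acc).getD k []
        = acc.getD k [] ++ (g.filter (fun e => pvNorm m (tgt e) == k)).map keep := by
  intro g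
  induction g with
  | nil => intro acc m hm hg k hk; simp
  | cons e t ih =>
    intro acc m hm hg k hk
    have he := hg e (List.mem_cons_self)
    have h1 : -(acc.length : Int) ≤ tgt e := by omega
    have h2 : tgt e < acc.length := by omega
    have hset : PySem.List.pySetD acc (tgt e) (PySem.List.pyGetD acc (tgt e) [] ++ [keep e])
        = acc.set (pvNorm m (tgt e)) (acc.getD (pvNorm m (tgt e)) [] ++ [keep e]) := by
      rw [pvSetD_norm _ _ _ h1 h2, pvGetD_norm _ _ _ h1 h2, hm]
    have hlen : (acc.set (pvNorm m (tgt e)) (acc.getD (pvNorm m (tgt e)) [] ++ [keep e])).length = m := by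
      simp [hm]
    simp only [List.foldl_cons, hset,
      ih _ m hlen (fun e' he' => hg e' (List.mem_cons_of_mem _ he')) k hk]
    by_cases hek : pvNorm m (tgt e) = k
    · have hkl : k < acc.length := by omega
      simp [hek, List.getD_eq_getElem?_getD, hkl]
    · have : (acc.set (pvNorm m (tgt e)) (acc.getD (pvNorm m (tgt e)) [] ++ [keep e])).getD k [] = acc.getD k [] := by
        simp [List.getD_eq_getElem?_getD, hek]
      simp [hek]

-- a sum-accumulating fold is the sum of the mapped list
theorem pvFoldl_sum (f : Int → Int) : ∀ (bs : List Int) (c : Int),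
    bs.foldl (fun a p => a + f p) c = c + (bs.map f).sum := by
  intro bs
  induction bs with
  | nil => intro c; simp
  | cons b t ih => intro c; simp [ih]; ring

-- one round of A equals one round of B (over the prebuilt buckets)
theorem pvRound_eq (graph : List (Int × Int)) (n : Int)
    (hpre : Pre_invariant_labels graph n) (L : List Int) :
    pvRoundA graph n L = pvRoundB (pvBuckets graph n) n L := by
  simp only [pvRoundA, pvRoundB, pvBuckets]
  rw [pvSplitA, pvSplitB]
  apply List.map_congr_left
  intro x hx
  rw [PySem.List.mem_pyRange_one] at hx
  set m := n.toNat with hmdef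
  have hx2 : x.toNat < m := by omega
  have hxx : x = ((x.toNat : Nat) : Int) := by omega
  have hinc : ∀ e ∈ graph, -(m : Int) ≤ e.2 ∧ e.2 < m := by
    intro e he; have := hpre e he; omega
  have hout : ∀ e ∈ graph, -(m : Int) ≤ e.1 ∧ e.1 < m := by
    intro e he; have := hpre e he; omega
  rw [hxx, PySem.List.pyGetD_natCast, PySem.List.pyGetD_natCast,
      PySem.List.pyGetD_natCast, PySem.List.pyGetD_natCast]
  rw [pvScatter (fun e => e.2) (fun e => PySem.List.pyGetD L e.1 0) graph _ m (by simp) hinc _ hx2]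
  rw [pvScatter (fun e => e.1) (fun e => PySem.List.pyGetD L e.2 0) graph _ m (by simp) hout _ hx2]
  rw [pvGather (fun e => e.2) (fun e => e.1) graph _ m (by simp) hinc _ hx2]
  rw [pvGather (fun e => e.1) (fun e => e.2) graph _ m (by simp) hout _ hx2]
  rw [pvFoldl_sum, pvFoldl_sum]
  simp [hx2, List.map_map, Function.comp_def]

-- ===== VERDICT (by name: the statement is the Claim_ definition above) =====
theorem invariant_labels_spec : Claim_equal_invariant_labels := by
  intro graph n _ hpre
  unfold Spec_invariant_labels invariant_labels invariant_labels_alt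
  rw [pvRound_eq graph n hpre, pvRound_eq graph n hpre]
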